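-- pv_equiv track=rewrite | github.com/letteropener/algo_exercises | Dominator.py | solution
-- ===== SOURCE A (Python) =====
-- def solution(A):
--     # write your code in Python 3.6
--     counter = 0
--     tmp_value = -1
--     for i in A:
--         if counter == 0:
--             tmp_value = i
--             counter += 1
--         else:
--             if i == tmp_value:
--                 counter += 1
--             else:
--                 counter -= 1
--     leader_candidate = -1
--     if counter > 0:
--         leader_candidate = tmp_value
--     leader_counter = 0
--     leader = -1
--     for i in A:
--         if i == leader_candidate:
--             leader_counter += 1
--         if leader_counter > (len(A) // 2):
--             leader = leader_candidate
--             return A.index(leader)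
--     return leader
-- ===== SOURCE B (Python) =====
-- def solution(A):
--     counts = {}
--     for x in A:
--         counts[x] = counts.get(x, 0) + 1
--     half = len(A) // 2
--     for v, c in counts.items():
--         if c > half:
--             return A.index(v)
--     return -1
-- ===== Notes on version B (the rewrite author's own statement) =====
-- stated objective: simpler
-- what changed: Replaces the Boyer-Moore vote-then-verify two-pass scheme (with its early-return prefix count) by a single frequency-dict pass followed by a scan of the dict items for a count exceeding len(A)//2.
import Mathlib
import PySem

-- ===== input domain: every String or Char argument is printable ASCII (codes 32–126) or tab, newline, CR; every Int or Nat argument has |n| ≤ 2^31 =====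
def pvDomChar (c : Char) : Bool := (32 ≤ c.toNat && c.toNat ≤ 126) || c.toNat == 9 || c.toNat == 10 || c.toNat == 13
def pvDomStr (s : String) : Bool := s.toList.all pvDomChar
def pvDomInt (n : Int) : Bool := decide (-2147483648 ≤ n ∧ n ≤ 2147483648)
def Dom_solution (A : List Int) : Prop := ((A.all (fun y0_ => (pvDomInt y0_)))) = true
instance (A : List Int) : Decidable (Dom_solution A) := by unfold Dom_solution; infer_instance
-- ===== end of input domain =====

-- B replaces A's Boyer-Moore vote-then-verify two-pass scheme by one frequency-dict pass
-- plus a scan of the dict items for a count exceeding len(A)//2 (objective: simpler).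

-- ===== PORT A =====
-- first loop of A: Boyer-Moore voting step on state (counter, tmp_value)
def bmStep (st : Int × Int) (i : Int) : Int × Int :=
  if st.1 = 0 then (st.1 + 1, i)
  else if i = st.2 then (st.1 + 1, st.2)
  else (st.1 - 1, st.2)

-- second loop of A: counts leader_candidate, early return A.index(leader) when the
-- running count exceeds half.  The .getD 0 is unreachable: the count just became
-- positive, so the candidate occurs in A and A.index cannot raise.
def verifyLoop (A : List Int) (cand half : Int) : List Int → Int → Int
  | [], _ => -1
  | i :: rest, lc =>
    let lc' := if i = cand then lc + 1 else lc
    if lc' > half then (((PySem.List.index? A cand).getD 0 : Nat) : Int)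
    else verifyLoop A cand half rest lc'

def solution (A : List Int) : Int :=
  let st := A.foldl bmStep (0, -1)
  let cand := if st.1 > 0 then st.2 else -1
  verifyLoop A cand (PySem.Int.floordiv (PySem.List.len A) 2) A 0

-- ===== PORT B =====
-- scan of counts.items(): first value with count > half, return A.index(v)
def altScan (A : List Int) (half : Int) : List (Int × Int) → Int
  | [] => -1
  | (v, c) :: rest =>
    if c > half then (((PySem.List.index? A v).getD 0 : Nat) : Int)
    else altScan A half rest

def solution_alt (A : List Int) : Int :=
  let counts := A.foldl (fun (d : PySem.Dict Int Int) x => d.insert x (d.getD x 0 + 1)) PySem.Dict.empty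
  let half := PySem.Int.floordiv (PySem.List.len A) 2
  altScan A half counts.items

-- ===== PRECONDITION & SPEC =====
def Spec_solution (A : List Int) (out : Int) : Prop := out = solution_alt A
instance (A : List Int) (out : Int) : Decidable (Spec_solution A out) := by unfold Spec_solution; infer_instance

-- ===== CLAIM (what is proved, stated in full; the proofs are below) =====
def Claim_equal_solution : Prop := ∀ (A : List Int), Dom_solution A → Spec_solution A (solution A)

-- ===== LEMMAS AND PROOFS =====

-- Boyer-Moore invariant: the "weight" of x (counter if x is the candidate, else -counter)
-- grows by at least 2*(occurrences of x) - (length) over any list processed.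
lemma bm_inv (l : List Int) (st : Int × Int) (h : 0 ≤ st.1) (x : Int) :
    0 ≤ (l.foldl bmStep st).1 ∧
    (if x = st.2 then st.1 else -st.1) + 2 * (l.count x : Int) - l.length
      ≤ (if x = (l.foldl bmStep st).2 then (l.foldl bmStep st).1 else -(l.foldl bmStep st).1) := by
  induction l generalizing st with
  | nil => simpa using h
  | cons i rest ih =>
    simp only [List.foldl_cons, List.count_cons, List.length_cons, beq_iff_eq]
    have hstep : 0 ≤ (bmStep st i).1 := by
      simp only [bmStep]; split_ifs <;> simp <;> omega
    obtain ⟨h1, h2⟩ := ih (bmStep st i) hstep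
    refine ⟨h1, ?_⟩
    have hb : (if x = (bmStep st i).2 then (bmStep st i).1 else -(bmStep st i).1)
        ≥ (if x = st.2 then st.1 else -st.1) + 2 * (if x = i then (1:Int) else 0) - 1 := by
      clear h1 h2 ih h
      simp only [bmStep]
      split_ifs <;> simp_all <;> omega
    push_cast at h2 ⊢
    split_ifs at h2 hb ⊢ <;> omega

-- if m is a strict majority, the vote ends with candidate m and positive counter
lemma bm_majority (A : List Int) (m : Int) (h : A.length < 2 * A.count m) :
    (A.foldl bmStep (0, -1)).2 = m ∧ 0 < (A.foldl bmStep (0, -1)).1 := by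
  obtain ⟨h1, h2⟩ := bm_inv A (0, -1) (by simp) m
  simp only at h2
  by_cases hm : m = (A.foldl bmStep (0, -1)).2
  · refine ⟨hm.symm, ?_⟩
    simp only [if_pos hm] at h2
    split_ifs at h2 <;> omega
  · exfalso
    simp only [if_neg hm] at h2
    split_ifs at h2 <;> omega

-- A's second loop returns the index iff the total count of cand exceeds half
lemma verify_eq (A : List Int) (cand half : Int) (l : List Int) (lc : Int) (h : lc ≤ half) :
    verifyLoop A cand half l lc =
      if half < lc + (l.count cand : Int) then (((PySem.List.index? A cand).getD 0 : Nat) : Int) else -1 := by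
  induction l generalizing lc with
  | nil => simp [verifyLoop, not_lt.mpr h]
  | cons i rest ih =>
    simp only [verifyLoop, List.count_cons, beq_iff_eq]
    by_cases hi : i = cand
    · simp only [if_pos hi]
      by_cases hgt : lc + 1 > half
      · have hcnt : half < lc + ((rest.count cand : Int) + 1) := by omega
        simp [hgt, hcnt]
      · rw [if_neg hgt, ih (lc + 1) (by omega)]
        push_cast
        congr 1
        simp only [eq_iff_iff]
        constructor <;> intro <;> omega
    · simp only [if_neg hi]
      by_cases hgt : lc > half
      · omega
      · rw [if_neg hgt, ih lc h]
        push_cast [hi]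
        norm_num

lemma altScan_none (A : List Int) (half : Int) (L : List (Int × Int))
    (h : ∀ p ∈ L, ¬ half < p.2) : altScan A half L = -1 := by
  induction L with
  | nil => simp [altScan]
  | cons p rest ih =>
    obtain ⟨v, c⟩ := p
    have hc : ¬ c > half := h (v, c) (by simp)
    simp only [altScan]
    rw [if_neg hc]
    exact ih (fun q hq => h q (by simp [hq]))

lemma altScan_find (A : List Int) (half : Int) (m : Int) (L : List (Int × Int))
    (hmem : ∃ c, (m, c) ∈ L ∧ half < c)
    (huniq : ∀ p ∈ L, half < p.2 → p.1 = m) :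
    altScan A half L = (((PySem.List.index? A m).getD 0 : Nat) : Int) := by
  induction L with
  | nil => simp at hmem
  | cons p rest ih =>
    obtain ⟨v, c⟩ := p
    by_cases hc : half < c
    · have hv : v = m := huniq (v, c) (by simp) hc
      simp [altScan, hc, hv]
    · simp only [altScan, if_neg hc]
      refine ih ?_ (fun q hq => huniq q (by simp [hq]))
      obtain ⟨c', hc', hgt⟩ := hmem
      rcases List.mem_cons.mp hc' with heq | hmem'
      · injection heq with h1 h2
        subst h2
        exact absurd hgt hc
      · exact ⟨c', hmem', hgt⟩

-- two distinct values cannot both occur more than half the time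
lemma count_pair_le (A : List Int) (v w : Int) (h : v ≠ w) :
    A.count v + A.count w ≤ A.length := by
  induction A with
  | nil => simp
  | cons a rest ih =>
    simp only [List.count_cons, List.length_cons, beq_iff_eq]
    split_ifs with h1 h2 h2 <;> omega

-- B's dict is Counter(A): its items are the distinct values with their counts
lemma alt_items (A : List Int) :
    (A.foldl (fun (d : PySem.Dict Int Int) x => d.insert x (d.getD x 0 + 1)) PySem.Dict.empty).items
      = (PySem.Set.ofList A).map (fun k => (k, (A.count k : Int))) := by
  rw [PySem.Dict.foldl_insert_getD_add_one_eq_counter]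
  exact PySem.Dict.items_counter A

-- ===== VERDICT (by name: the statement is the Claim_ definition above) =====
theorem solution_spec : Claim_equal_solution := by
  intro A _
  show solution A = solution_alt A
  simp only [solution, solution_alt, alt_items]
  have hhalf : PySem.Int.floordiv (PySem.List.len A) 2 = ((A.length / 2 : Nat) : Int) := by
    rw [PySem.List.len_eq]
    exact_mod_cast PySem.Int.floordiv_natCast A.length 2
  rw [hhalf]
  by_cases hmaj : ∃ m, A.length / 2 < A.count m
  · obtain ⟨m, hm⟩ := hmaj
    have h2 : A.length < 2 * A.count m := by omega
    obtain ⟨hcand, hpos⟩ := bm_majority A m h2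
    have huniq : ∀ k, A.length / 2 < A.count k → k = m := by
      intro k hk
      by_contra hne
      have := count_pair_le A k m hne
      omega
    rw [if_pos hpos, hcand, verify_eq A m _ A 0 (by positivity)]
    rw [if_pos (by push_cast; omega)]
    rw [altScan_find A _ m]
    · exact ⟨(A.count m : Int), by
        simp only [List.mem_map]
        exact ⟨⟨m, by
          rw [PySem.Set.mem_ofList]
          exact List.count_pos_iff.mp (by omega), rfl⟩, by push_cast; omega⟩⟩
    · intro p hp hgt
      simp only [List.mem_map] at hp
      obtain ⟨k, _, rfl⟩ := hp
      simp only at hgt ⊢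
      exact huniq k (by exact_mod_cast hgt)
  · push Not at hmaj
    set cand := if (A.foldl bmStep (0, -1)).1 > 0 then (A.foldl bmStep (0, -1)).2 else -1 with hc
    rw [verify_eq A cand _ A 0 (by positivity)]
    rw [if_neg (by have := hmaj cand; push_cast; omega)]
    rw [altScan_none]
    intro p hp
    simp only [List.mem_map] at hp
    obtain ⟨k, _, rfl⟩ := hp
    have := hmaj k
    simp only [not_lt]
    exact_mod_cast this
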